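-- pv_equiv track=rewrite | github.com/nat-bishop/cosmos-houdini-pipeline | cosmos_workflow/ui/tabs/runs_handlers.py | _calculate_runs_statistics
-- ===== SOURCE A (Python) =====
-- def _calculate_runs_statistics(runs: list, total_count: int) -> str:
--     """Calculate statistics for runs display.
--
--     Args:
--         runs: List of displayed runs
--         total_count: Total count before limiting
--
--     Returns:
--         Formatted statistics string
--     """
--     completed_count = sum(1 for r in runs if r.get("status") == "completed")
--     running_count = sum(1 for r in runs if r.get("status") == "running")
--     failed_count = sum(1 for r in runs if r.get("status") == "failed")
--
--     stats = f"""
--     **Total Matching:** {total_count} (showing {len(runs)})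
--     **Completed:** {completed_count}
--     **Running:** {running_count}
--     **Failed:** {failed_count}
--     """
--
--     return stats
-- ===== SOURCE B (Python) =====
-- def _calculate_runs_statistics(runs: list, total_count: int) -> str:
--     """Single-pass tally of statuses instead of three generator scans."""
--     completed_count = running_count = failed_count = 0
--     for r in runs:
--         status = r.get("status")
--         if status == "completed":
--             completed_count += 1
--         elif status == "running":
--             running_count += 1
--         elif status == "failed":
--             failed_count += 1
--
--     stats = f"""
--     **Total Matching:** {total_count} (showing {len(runs)})
--     **Completed:** {completed_count}
--     **Running:** {running_count}
--     **Failed:** {failed_count}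
--     """
--
--     return stats
-- ===== Notes on version B (the rewrite author's own statement) =====
-- stated objective: simpler
-- what changed: Replaces three separate generator-sum scans over runs with one single-pass if/elif tally of the three status counters; the f-string is unchanged.
import Mathlib
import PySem

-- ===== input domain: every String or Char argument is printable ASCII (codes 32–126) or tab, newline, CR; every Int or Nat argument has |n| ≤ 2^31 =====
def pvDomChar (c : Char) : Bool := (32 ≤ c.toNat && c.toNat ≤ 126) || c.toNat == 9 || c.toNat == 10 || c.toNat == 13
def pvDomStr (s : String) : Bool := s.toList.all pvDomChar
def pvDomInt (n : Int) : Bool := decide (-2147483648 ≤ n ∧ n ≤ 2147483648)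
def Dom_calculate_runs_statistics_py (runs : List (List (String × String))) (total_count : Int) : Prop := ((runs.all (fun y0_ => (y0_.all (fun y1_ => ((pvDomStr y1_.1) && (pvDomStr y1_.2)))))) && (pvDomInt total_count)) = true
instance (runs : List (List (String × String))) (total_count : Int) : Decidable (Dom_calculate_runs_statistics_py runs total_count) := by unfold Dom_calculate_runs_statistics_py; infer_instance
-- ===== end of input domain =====

-- ===== PORT A =====
-- A: three separate generator-sum passes over runs (countA = one sum(1 for r in runs if r.get("status") == s) pass), then the f-string.
def countA (runs : List (List (String × String))) (s : String) : Int :=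
  runs.foldl (fun acc r => if (PySem.Dict.mk r).get? "status" == some s then acc + 1 else acc) 0

def calculate_runs_statistics_py (runs : List (List (String × String))) (total_count : Int) : String :=
  let completed_count : Int := countA runs "completed"
  let running_count : Int := countA runs "running"
  let failed_count : Int := countA runs "failed"
  "\n    **Total Matching:** " ++ PySem.Int.toStr total_count ++ " (showing " ++ PySem.Int.toStr (runs.length : Int)
    ++ ")\n    **Completed:** " ++ PySem.Int.toStr completed_count
    ++ "\n    **Running:** " ++ PySem.Int.toStr running_count
    ++ "\n    **Failed:** " ++ PySem.Int.toStr failed_count ++ "\n    "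

-- ===== PORT B =====
-- B: one single-pass if/elif tally of the three counters; identical format string.
def pvTallyB : List (List (String × String)) → (Int × Int × Int) → (Int × Int × Int)
  | [], s => s
  | r :: rest, (c, ru, f) =>
    let status := (PySem.Dict.mk r).get? "status"
    if status == some "completed" then pvTallyB rest (c + 1, ru, f)
    else if status == some "running" then pvTallyB rest (c, ru + 1, f)
    else if status == some "failed" then pvTallyB rest (c, ru, f + 1)
    else pvTallyB rest (c, ru, f)

def calculate_runs_statistics_py_alt (runs : List (List (String × String))) (total_count : Int) : String :=
  let counts := pvTallyB runs (0, 0, 0)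
  "\n    **Total Matching:** " ++ PySem.Int.toStr total_count ++ " (showing " ++ PySem.Int.toStr (runs.length : Int)
    ++ ")\n    **Completed:** " ++ PySem.Int.toStr counts.1
    ++ "\n    **Running:** " ++ PySem.Int.toStr counts.2.1
    ++ "\n    **Failed:** " ++ PySem.Int.toStr counts.2.2 ++ "\n    "

-- ===== PRECONDITION & SPEC =====
def Spec_calculate_runs_statistics_py (runs : List (List (String × String))) (total_count : Int) (out : String) : Prop := out = calculate_runs_statistics_py_alt runs total_count
instance (runs : List (List (String × String))) (total_count : Int) (out : String) : Decidable (Spec_calculate_runs_statistics_py runs total_count out) := by unfold Spec_calculate_runs_statistics_py; infer_instance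

-- ===== CLAIM (what is proved, stated in full; the proofs are below) =====
def Claim_equal_calculate_runs_statistics_py : Prop := ∀ (runs : List (List (String × String))) (total_count : Int), Dom_calculate_runs_statistics_py runs total_count → Spec_calculate_runs_statistics_py runs total_count (calculate_runs_statistics_py runs total_count)

-- ===== LEMMAS AND PROOFS =====

lemma foldl_count_shift (rest : List (List (String × String))) (p : List (String × String) → Bool) (a : Int) :
    rest.foldl (fun acc r => if p r then acc + 1 else acc) a =
      a + rest.foldl (fun acc r => if p r then acc + 1 else acc) 0 := by
  induction rest generalizing a with
  | nil => simp
  | cons r rest ih =>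
    simp only [List.foldl_cons]
    by_cases h : p r = true
    · simp only [h, if_true]; rw [ih (a + 1), ih (0 + 1)]; ring
    · simp only [h, if_false]; exact ih a

lemma countA_cons (r : List (String × String)) (rest : List (List (String × String))) (s : String) :
    countA (r :: rest) s =
      (if (PySem.Dict.mk r).get? "status" == some s then 1 else 0) + countA rest s := by
  unfold countA
  simp only [List.foldl_cons]
  by_cases h : ((PySem.Dict.mk r).get? "status" == some s) = true
  · simp only [h, if_true]
    exact foldl_count_shift rest (fun r => (PySem.Dict.mk r).get? "status" == some s) 1
  · simp only [h, if_false]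
    simp

lemma pvTallyB_acc (runs : List (List (String × String))) (c ru f : Int) :
    pvTallyB runs (c, ru, f) =
      (c + countA runs "completed", ru + countA runs "running", f + countA runs "failed") := by
  induction runs generalizing c ru f with
  | nil => simp [pvTallyB, countA]
  | cons r rest ih =>
    simp only [pvTallyB, countA_cons]
    by_cases h1 : ((PySem.Dict.mk r).get? "status" == some "completed") = true
    · have h2 : ((PySem.Dict.mk r).get? "status" == some "running") = false := by
        cases hg : (PySem.Dict.mk r).get? "status" <;> simp_all
      have h3 : ((PySem.Dict.mk r).get? "status" == some "failed") = false := by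
        cases hg : (PySem.Dict.mk r).get? "status" <;> simp_all
      simp only [h1, h2, h3, if_true, Bool.false_eq_true, if_false, ih]
      refine Prod.ext ?_ (Prod.ext ?_ ?_) <;> simp <;> ring
    · by_cases h2 : ((PySem.Dict.mk r).get? "status" == some "running") = true
      · have h3 : ((PySem.Dict.mk r).get? "status" == some "failed") = false := by
          cases hg : (PySem.Dict.mk r).get? "status" <;> simp_all
        simp only [h1, h2, h3, if_true, Bool.false_eq_true, if_false, Bool.not_eq_true] at *
        simp only [h1, Bool.false_eq_true, if_false, h2, if_true, h3, ih]
        refine Prod.ext ?_ (Prod.ext ?_ ?_) <;> simp <;> ring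
      · by_cases h3 : ((PySem.Dict.mk r).get? "status" == some "failed") = true
        · simp only [Bool.not_eq_true] at h1 h2
          simp only [h1, h2, Bool.false_eq_true, if_false, h3, if_true, ih]
          refine Prod.ext ?_ (Prod.ext ?_ ?_) <;> simp <;> ring
        · simp only [Bool.not_eq_true] at h1 h2 h3
          simp only [h1, h2, h3, Bool.false_eq_true, if_false, ih]
          refine Prod.ext ?_ (Prod.ext ?_ ?_) <;> simp

-- ===== VERDICT (by name: the statement is the Claim_ definition above) =====
theorem calculate_runs_statistics_py_spec : Claim_equal_calculate_runs_statistics_py := by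
  intro runs total_count _
  unfold Spec_calculate_runs_statistics_py calculate_runs_statistics_py calculate_runs_statistics_py_alt
  rw [pvTallyB_acc]
  simp
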